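-- pv_equiv track=rewrite | github.com/AlastairCodd/Caverna | automated_tests/business_logic_tests/action_tests/place_a_tile_action_tests/partition.py | summations
-- ===== SOURCE A (Python) =====
-- from typing import Dict, List
-- from math import floor
--
-- def summations(index: int) -> Dict[int, bool]:
--     positions_for_index: List[int] = positions(index)
--     result: Dict[int, bool] = {}
--     for i in range(len(positions_for_index)):
--         term_in_position: int = positions_for_index[i]
--         add: bool = floor(i / 2) % 2 == 0
--         result[term_in_position] = add
--
--     return result
--
-- def positions(index: int) -> List[int]:
--     sequence_for_index: List[int] = sequence(index)
--     next_term: int = 1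
--     result: List[int] = [1]
--     for term_in_sequence in sequence_for_index:
--         next_term += term_in_sequence
--         if next_term < index:
--             result.append(next_term)
--         else:
--             break
--
--     return result
--
-- def sequence(index: int) -> List[int]:
--     result: List[int] = []
--
--     for i in range(1, index):
--         # 1 2 3 4 5 6
--         # 1 3 2 5 3 7 ...
--         next_term: int
--         if i % 2 == 0:  # even
--             next_term = i + 1
--         else:  # odd
--             next_term = int((i + 1) / 2)
--         result.append(next_term)
--
--     return result
-- ===== SOURCE B (Python) =====
-- from typing import Dict
--
-- def summations(index: int) -> Dict[int, bool]:
--     # generate generalized pentagonal numbers directly; stop at the first one >= index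
--     result: Dict[int, bool] = {1: True}
--     k = 1
--     while True:
--         add = k % 2 == 1
--         p = k * (3 * k - 1) // 2
--         if p >= index:
--             return result
--         result[p] = add
--         p = k * (3 * k + 1) // 2
--         if p >= index:
--             return result
--         result[p] = add
--         k += 1
-- ===== Notes on version B (the rewrite author's own statement) =====
-- stated objective: faster
-- what changed: Instead of materialising the O(index)-long helper 'sequence' list and cumulatively summing it, B generates the positions (generalized pentagonal numbers k(3k-1)/2, k(3k+1)/2) directly by closed formula and stops at the first one >= index, so only O(sqrt(index)) work is done.
import Mathlib
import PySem

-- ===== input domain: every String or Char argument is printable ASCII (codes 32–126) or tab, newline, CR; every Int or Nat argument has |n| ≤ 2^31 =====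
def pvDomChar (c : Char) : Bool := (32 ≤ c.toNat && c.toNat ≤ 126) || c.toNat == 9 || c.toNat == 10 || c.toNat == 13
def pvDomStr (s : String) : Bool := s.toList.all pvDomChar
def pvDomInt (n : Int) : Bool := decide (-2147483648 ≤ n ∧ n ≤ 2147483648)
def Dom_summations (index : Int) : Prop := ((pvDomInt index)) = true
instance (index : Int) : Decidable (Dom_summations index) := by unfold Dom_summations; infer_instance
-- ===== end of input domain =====

-- B replaces A's O(index) helper chain (materialised 'sequence' list + cumulative sums) by directly
-- generating the generalized pentagonal numbers k(3k-1)/2, k(3k+1)/2 until they reach index: O(sqrt(index)).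

-- ===== PORT A =====
-- helper: body of sequence's loop.  Python 'int((i + 1) / 2)' is float true division then int();
-- it is exact here (the branch runs for odd i ≥ 1, so i+1 is even, positive and < 2^32): ported as floor division.
def pvSeqTerm (i : Int) : Int :=
  if PySem.Int.mod i 2 == 0 then i + 1 else PySem.Int.floordiv (i + 1) 2

def sequenceA (index : Int) : List Int :=
  (PySem.List.pyRange 1 index 1).foldl (fun result i => result ++ [pvSeqTerm i]) []

-- positions' loop: 'for term_in_sequence in …: next_term += …; if < index: append else break'
def positionsLoop (index : Int) : List Int → Int → List Int → List Int
  | [], _, result => result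
  | t :: ts, next_term, result =>
      if next_term + t < index then positionsLoop index ts (next_term + t) (result ++ [next_term + t])
      else result

def positionsA (index : Int) : List Int := positionsLoop index (sequenceA index) 1 [1]

-- summations' loop: 'for i in range(len(ps)): result[ps[i]] = floor(i/2) % 2 == 0'
-- (index i and element walked together; math.floor(i/2) is exact for these nonnegative i: floor division)
def dictLoop : List Int → Int → PySem.Dict Int Bool → PySem.Dict Int Bool
  | [], _, d => d
  | p :: ps, i, d =>
      dictLoop ps (i + 1) (d.insert p (PySem.Int.mod (PySem.Int.floordiv i 2) 2 == 0))

def summations (index : Int) : List (Int × Bool) :=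
  (dictLoop (positionsA index) 0 PySem.Dict.empty).items

-- ===== PORT B =====
-- used by altLoop's termination proof
theorem pv_le_gB (k : Int) : k ≤ PySem.Int.floordiv (k * (3 * k + 1)) 2 := by
  rw [PySem.Int.floordiv_eq_ediv_of_pos (by omega)]
  have h : 2 * k ≤ k * (3 * k + 1) := by
    rcases le_total k 0 with h|h
    · nlinarith [mul_nonneg (by omega : (0:Int) ≤ -k) (by omega : (0:Int) ≤ 1 - 3*k)]
    · rcases h.eq_or_lt with rfl|h
      · norm_num
      · nlinarith [mul_nonneg (by omega : (0:Int) ≤ k) (by omega : (0:Int) ≤ 3*k - 1)]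
  calc k = 2 * k / 2 := by omega
    _ ≤ k * (3 * k + 1) / 2 := Int.ediv_le_ediv (by norm_num) h

def altLoop (index k : Int) (result : PySem.Dict Int Bool) : PySem.Dict Int Bool :=
  if PySem.Int.floordiv (k * (3 * k - 1)) 2 ≥ index then result
  else
    let add := PySem.Int.mod k 2 == 1
    let r1 := result.insert (PySem.Int.floordiv (k * (3 * k - 1)) 2) add
    if h2 : PySem.Int.floordiv (k * (3 * k + 1)) 2 ≥ index then r1
    else altLoop index (k + 1) (r1.insert (PySem.Int.floordiv (k * (3 * k + 1)) 2) add)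
termination_by (index - k).toNat
decreasing_by
  have := pv_le_gB k
  omega

def summations_alt (index : Int) : List (Int × Bool) :=
  (altLoop index 1 (PySem.Dict.empty.insert 1 true)).items

-- ===== PRECONDITION & SPEC =====
def Spec_summations (index : Int) (out : List (Int × Bool)) : Prop := out = summations_alt index
instance (index : Int) (out : List (Int × Bool)) : Decidable (Spec_summations index out) := by unfold Spec_summations; infer_instance

-- ===== CLAIM (what is proved, stated in full; the proofs are below) =====
def Claim_equal_summations : Prop := ∀ (index : Int), Dom_summations index → Spec_summations index (summations index)

-- ===== LEMMAS AND PROOFS =====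

-- proof-only abbreviations for the two pentagonal closed forms B computes
def gA (k : Int) : Int := PySem.Int.floordiv (k * (3 * k - 1)) 2
def gB (k : Int) : Int := PySem.Int.floordiv (k * (3 * k + 1)) 2

theorem two_gA (k : Int) : 2 * gA k = k * (3 * k - 1) := by
  unfold gA
  rw [PySem.Int.floordiv_eq_ediv_of_pos (by omega)]
  refine Int.mul_ediv_cancel' ?_
  rcases Int.even_or_odd k with ⟨m, rfl⟩ | ⟨m, rfl⟩
  · exact ⟨m * (6 * m - 1), by ring⟩
  · exact ⟨(2 * m + 1) * (3 * m + 1), by ring⟩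

theorem two_gB (k : Int) : 2 * gB k = k * (3 * k + 1) := by
  unfold gB
  rw [PySem.Int.floordiv_eq_ediv_of_pos (by omega)]
  refine Int.mul_ediv_cancel' ?_
  rcases Int.even_or_odd k with ⟨m, rfl⟩ | ⟨m, rfl⟩
  · exact ⟨m * (6 * m + 1), by ring⟩
  · exact ⟨(2 * m + 1) * (3 * m + 2), by ring⟩

theorem gagb (k : Int) : gA k + k = gB k := by
  have h : k * (3 * k + 1) = k * (3 * k - 1) + 2 * k := by ring
  linarith [two_gA k, two_gB k]

theorem gbga (k : Int) : gB k + (2 * k + 1) = gA (k + 1) := by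
  have h : (k + 1) * (3 * (k + 1) - 1) = k * (3 * k + 1) + 4 * k + 2 := by ring
  linarith [two_gB k, two_gA (k + 1)]

theorem gA_ge (k : Int) (hk : 1 ≤ k) : 2 * k - 1 ≤ gA k := by
  have h0 : 0 ≤ (3 * k - 2) * (k - 1) := mul_nonneg (by omega) (by omega)
  have h : k * (3 * k - 1) = 2 * (2 * k - 1) + (3 * k - 2) * (k - 1) := by ring
  linarith [two_gA k]

theorem gB_ge (k : Int) (hk : 1 ≤ k) : 2 * k ≤ gB k := by
  have h0 : 0 ≤ (3 * k) * (k - 1) := mul_nonneg (by omega) (by omega)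
  have h : k * (3 * k + 1) = 2 * (2 * k) + (3 * k) * (k - 1) := by ring
  linarith [two_gB k]

theorem fd1 (k : Int) : PySem.Int.floordiv (2 * k - 2) 2 = k - 1 := by
  rw [PySem.Int.floordiv_eq_ediv_of_pos (by omega)]; omega

theorem fd2 (k : Int) : PySem.Int.floordiv (2 * k - 1) 2 = k - 1 := by
  rw [PySem.Int.floordiv_eq_ediv_of_pos (by omega)]; omega

-- A's sign flag at list positions 2k-2 and 2k-1 equals B's flag at k
theorem flag_eq (k : Int) :
    ((PySem.Int.mod (k - 1) 2 == 0) : Bool) = (PySem.Int.mod k 2 == 1) := by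
  rw [PySem.Int.mod_eq_emod_of_pos (a := k - 1) (by omega),
      PySem.Int.mod_eq_emod_of_pos (a := k) (by omega)]
  rcases Int.emod_two_eq k with h | h
  · have h' : (k - 1) % 2 = 1 := by omega
    simp [h, h']
  · have h' : (k - 1) % 2 = 0 := by omega
    simp [h, h']

theorem seq_odd (k : Int) : pvSeqTerm (2 * k - 1) = k := by
  unfold pvSeqTerm
  have h : PySem.Int.mod (2 * k - 1) 2 = 1 := by
    rw [PySem.Int.mod_eq_emod_of_pos (by omega)]; omega
  rw [h]
  have h2 : (2 * k - 1 + 1) = 2 * k := by ring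
  rw [h2, PySem.Int.floordiv_eq_ediv_of_pos (by omega)]
  simp

theorem seq_even (k : Int) : pvSeqTerm (2 * k) = 2 * k + 1 := by
  unfold pvSeqTerm
  have h : PySem.Int.mod (2 * k) 2 = 0 := by
    rw [PySem.Int.mod_eq_emod_of_pos (by omega)]; omega
  rw [h]; simp

theorem sequenceA_eq (index : Int) :
    sequenceA index = (PySem.List.pyRange 1 index 1).map pvSeqTerm := by
  unfold sequenceA
  simpa using PySem.List.foldl_append_singleton_eq_map pvSeqTerm (PySem.List.pyRange 1 index 1) []

theorem posLoop_append (index : Int) (ts : List Int) : ∀ nt res,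
    positionsLoop index ts nt res = res ++ positionsLoop index ts nt [] := by
  induction ts with
  | nil => intro nt res; simp [positionsLoop]
  | cons t ts ih =>
    intro nt res
    simp only [positionsLoop]
    split
    · rw [ih (nt + t) (res ++ [nt + t]), ih (nt + t) ([] ++ [nt + t])]
      simp
    · simp

theorem main (index : Int) : ∀ n (k : Int), (index - k).toNat = n → 1 ≤ k → gA k < index →
    ∀ d, dictLoop (gA k :: positionsLoop index
            ((PySem.List.pyRange (2 * k - 1) index 1).map pvSeqTerm) (gA k) []) (2 * k - 2) d
         = altLoop index k d := by
  intro n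
  induction n using Nat.strong_induction_on with
  | _ n IH =>
    intro k hn hk hlt d
    have hA : PySem.Int.floordiv (k * (3 * k - 1)) 2 = gA k := rfl
    have hB : PySem.Int.floordiv (k * (3 * k + 1)) 2 = gB k := rfl
    have h2k1 : 2 * k - 1 < index := lt_of_le_of_lt (gA_ge k hk) hlt
    rw [PySem.List.pyRange_one_cons h2k1, List.map_cons, seq_odd,
        show 2 * k - 1 + 1 = 2 * k by ring]
    rw [altLoop, hA, hB, if_neg (by omega)]
    simp only [positionsLoop, gagb k]
    by_cases hb : gB k < index
    · rw [if_pos hb, dif_neg (not_le.mpr hb)]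
      have h2k : 2 * k < index := lt_of_le_of_lt (gB_ge k hk) hb
      rw [PySem.List.pyRange_one_cons h2k, List.map_cons, seq_even,
          posLoop_append index _ (gB k) ([] ++ [gB k])]
      simp only [positionsLoop, gbga k, List.nil_append]
      by_cases hc : gA (k + 1) < index
      · rw [if_pos hc, posLoop_append index _ (gA (k + 1)) [gA (k + 1)]]
        simp only [List.nil_append, List.cons_append, dictLoop]
        have hlt' : k < index := by have := gB_ge k hk; omega
        have hIH := IH ((index - (k + 1)).toNat) (by omega) (k + 1) rfl (by omega) hc
          ((d.insert (gA k) (PySem.Int.mod (PySem.Int.floordiv (2 * k - 2) 2) 2 == 0)).insert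
            (gB k) (PySem.Int.mod (PySem.Int.floordiv (2 * k - 2 + 1) 2) 2 == 0))
        rw [show 2 * (k + 1) - 1 = 2 * k + 1 by ring, show 2 * (k + 1) - 2 = 2 * k - 2 + 1 + 1 by ring] at hIH
        simp only [dictLoop] at hIH
        rw [hIH]
        rw [fd1, show 2 * k - 2 + 1 = 2 * k - 1 by ring, fd2, flag_eq]
      · rw [if_neg hc]
        simp only [dictLoop, List.cons_append, List.nil_append]
        rw [altLoop]
        rw [show PySem.Int.floordiv ((k + 1) * (3 * (k + 1) - 1)) 2 = gA (k + 1) from rfl,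
            if_pos (by omega)]
        rw [fd1, show 2 * k - 2 + 1 = 2 * k - 1 by ring, fd2, flag_eq]
    · rw [if_neg hb, dif_pos (not_lt.mp hb)]
      simp only [dictLoop]
      rw [fd1, flag_eq]

theorem alt_init (index : Int) (h : 1 < index) :
    altLoop index 1 PySem.Dict.empty = altLoop index 1 (PySem.Dict.empty.insert 1 true) := by
  rw [altLoop, altLoop]
  have hc : ¬ (PySem.Int.floordiv (1 * (3 * 1 - 1)) 2 ≥ index) := by
    rw [show PySem.Int.floordiv (1 * (3 * 1 - 1)) 2 = 1 from rfl]; omega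
  rw [if_neg hc, if_neg hc]
  have hr : ((PySem.Dict.empty.insert 1 true).insert (PySem.Int.floordiv (1 * (3 * 1 - 1)) 2)
        (PySem.Int.mod 1 2 == 1))
      = (PySem.Dict.empty.insert (PySem.Int.floordiv (1 * (3 * 1 - 1)) 2)
        (PySem.Int.mod 1 2 == 1)) := by decide
  simp only [hr]

-- ===== VERDICT (by name: the statement is the Claim_ definition above) =====
theorem summations_spec : Claim_equal_summations := by
  unfold Claim_equal_summations
  intro index _
  unfold Spec_summations summations summations_alt positionsA
  rw [sequenceA_eq, posLoop_append]
  by_cases h : 1 < index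
  · have hg : gA 1 = 1 := rfl
    have hm := main index ((index - 1).toNat) 1 rfl le_rfl (by rw [hg]; exact h) PySem.Dict.empty
    rw [hg, show 2 * (1:Int) - 1 = 1 from rfl, show 2 * (1:Int) - 2 = 0 from rfl] at hm
    rw [show ([1] ++ positionsLoop index ((PySem.List.pyRange 1 index 1).map pvSeqTerm) 1 [])
          = (1 :: positionsLoop index ((PySem.List.pyRange 1 index 1).map pvSeqTerm) 1 []) from rfl]
    rw [hm, alt_init index h]
  · rw [PySem.List.pyRange_one_eq_nil (by omega)]
    rw [altLoop, if_pos (by rw [show PySem.Int.floordiv (1 * (3 * 1 - 1)) 2 = 1 from rfl]; omega)]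
    simp [positionsLoop, dictLoop]
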